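-- pv_equiv track=rewrite | github.com/RecklessCrow/Morena_Problem | main.py | check_periodicity
-- ===== SOURCE A (Python) =====
-- from itertools import groupby
--
-- def check_periodicity(idx_list):
--     def all_equal(iterable):
--         """
--         from https://stackoverflow.com/questions/3844801/check-if-all-elements-in-a-list-are-identical
--         :param iterable:
--         :return:
--         """
--         g = groupby(iterable)
--         return next(g, True) and not next(g, False)
--
--     new_idx_list = idx_list
--     while len(new_idx_list) > 2:
--         pattern_distances = [new_idx_list[i + 1] - new_idx_list[i] for i in range(len(new_idx_list) - 1)]
--
--         if all_equal(pattern_distances):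
--             return True, new_idx_list
--
--         new_idx_list = new_idx_list[1:]
--
--     return False, idx_list
-- ===== SOURCE B (Python) =====
-- def check_periodicity(idx_list):
--     # Single backward pass over the differences: walk k from the last gap
--     # toward the front while consecutive gaps stay equal; idx_list[k:] is then
--     # the longest arithmetic-progression suffix (needs length >= 3).
--     n = len(idx_list)
--     if n <= 2:
--         return False, idx_list
--     k = n - 2
--     while k > 0 and idx_list[k] - idx_list[k - 1] == idx_list[k + 1] - idx_list[k]:
--         k -= 1
--     if n - k >= 3:
--         return True, idx_list[k:]
--     return False, idx_list
-- ===== Notes on version B (the rewrite author's own statement) =====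
-- stated objective: faster
-- what changed: Instead of rebuilding the whole difference list and re-testing all-equality for every suffix, B makes a single backward pass over the gaps, walking the start index left while consecutive gaps are equal, and returns the suffix directly.
import Mathlib
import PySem

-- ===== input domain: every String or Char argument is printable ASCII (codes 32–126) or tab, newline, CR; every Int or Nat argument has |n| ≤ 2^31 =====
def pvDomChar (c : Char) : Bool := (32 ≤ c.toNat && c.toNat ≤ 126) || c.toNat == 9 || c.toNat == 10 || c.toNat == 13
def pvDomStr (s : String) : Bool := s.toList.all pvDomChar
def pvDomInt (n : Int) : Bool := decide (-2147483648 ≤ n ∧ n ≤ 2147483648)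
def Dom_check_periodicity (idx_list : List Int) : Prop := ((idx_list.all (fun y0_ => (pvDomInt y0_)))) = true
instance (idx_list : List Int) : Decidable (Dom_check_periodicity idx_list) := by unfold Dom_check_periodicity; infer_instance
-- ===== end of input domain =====

-- B replaces A's quadratic "rebuild all gaps and re-test every suffix" loop with one
-- backward pass over the gaps (objective: faster, asymptotic O(n) vs O(n^2)).

-- ===== PORT A =====
-- all_equal via groupby: 'next(g, True) and not next(g, False)' is True iff the
-- iterable has at most one group, i.e. all elements are equal (empty list: True).
def pvAllEqual (l : List Int) : Bool :=
  match l with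
  | [] => true
  | x :: xs => xs.all (fun y => y == x)

-- pattern_distances = [lst[i+1] - lst[i] for i in range(len(lst)-1)]; indices are in range, getD is exact here
def pvDiffs (l : List Int) : List Int :=
  (List.range (l.length - 1)).map (fun i => l.getD (i + 1) 0 - l.getD i 0)

-- the 'while len(new_idx_list) > 2' loop; 'new_idx_list[1:]' is .tail
def cpLoop (l : List Int) : Option (List Int) :=
  if l.length > 2 then
    if pvAllEqual (pvDiffs l) then some l
    else cpLoop l.tail
  else none
termination_by l.length
decreasing_by
  cases l with
  | nil => simp at *
  | cons x xs => simp

def check_periodicity (idx_list : List Int) : Bool × List Int :=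
  match cpLoop idx_list with
  | some l => (true, l)
  | none => (false, idx_list)

-- ===== PORT B =====
-- the 'while k > 0 and lst[k]-lst[k-1] == lst[k+1]-lst[k]: k -= 1' loop; indices in range, getD exact
def cpScan (l : List Int) : Nat → Nat
  | 0 => 0
  | k + 1 =>
    if l.getD (k + 1) 0 - l.getD k 0 == l.getD (k + 2) 0 - l.getD (k + 1) 0
    then cpScan l k else k + 1

def check_periodicity_alt (idx_list : List Int) : Bool × List Int :=
  let n := idx_list.length
  if n ≤ 2 then (false, idx_list)
  else
    let k := cpScan idx_list (n - 2)
    -- idx_list[k:] with 0 ≤ k is .drop k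
    if n - k ≥ 3 then (true, idx_list.drop k) else (false, idx_list)

-- ===== PRECONDITION & SPEC =====
def Spec_check_periodicity (idx_list : List Int) (out : Bool × List Int) : Prop := out = check_periodicity_alt idx_list
instance (idx_list : List Int) (out : Bool × List Int) : Decidable (Spec_check_periodicity idx_list out) := by unfold Spec_check_periodicity; infer_instance

-- ===== CLAIM (what is proved, stated in full; the proofs are below) =====
def Claim_equal_check_periodicity : Prop := ∀ (idx_list : List Int), Dom_check_periodicity idx_list → Spec_check_periodicity idx_list (check_periodicity idx_list)

-- ===== LEMMAS AND PROOFS =====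

-- gap i of l
def pvGap (l : List Int) (i : Nat) : Int := l.getD (i + 1) 0 - l.getD i 0

theorem cpScan_le (l : List Int) (k : Nat) : cpScan l k ≤ k := by
  induction k with
  | zero => simp [cpScan]
  | succ k ih => simp only [cpScan]; split <;> omega

theorem cpScan_eq_zero_iff (l : List Int) (k : Nat) :
    cpScan l k = 0 ↔ ∀ j < k, pvGap l j = pvGap l (j + 1) := by
  induction k with
  | zero => simp [cpScan]
  | succ k ih =>
    simp only [cpScan]
    split
    · rename_i h
      rw [ih]
      constructor
      · intro hall j hj
        rcases Nat.lt_succ_iff_lt_or_eq.mp hj with h' | h'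
        · exact hall j h'
        · subst h'; simpa [pvGap] using beq_iff_eq.mp h
      · intro hall j hj; exact hall j (Nat.lt_succ_of_lt hj)
    · rename_i h
      constructor
      · intro h0; omega
      · intro hall
        exact absurd (beq_iff_eq.mpr (by simpa [pvGap] using hall k (Nat.lt_succ_self k))) h

-- shift: scanning x::xs from index k+1 vs scanning xs from index k
theorem cpScan_cons_shift (x : Int) (xs : List Int) (k : Nat) (hk : 1 ≤ k) :
    cpScan (x :: xs) (k + 1) =
      if cpScan xs k = 0 then cpScan (x :: xs) 1 else cpScan xs k + 1 := by
  induction k with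
  | zero => omega
  | succ k ih =>
    by_cases hk1 : 1 ≤ k
    · have := ih hk1
      simp only [cpScan, List.getD_cons_succ] at *
      split
      · rename_i h
        rw [this]
      · rename_i h
        simp
    · have hk0 : k = 0 := by omega
      subst hk0
      simp only [cpScan, List.getD_cons_succ]
      split
      · simp
      · simp

-- all_equal over the gaps iff all consecutive gaps are equal
theorem allEqual_diffs_iff (l : List Int) (h3 : 3 ≤ l.length) :
    pvAllEqual (pvDiffs l) = true ↔ ∀ j < l.length - 2, pvGap l j = pvGap l (j + 1) := by
  obtain ⟨m, hm⟩ : ∃ m, l.length - 1 = m + 1 := ⟨l.length - 2, by omega⟩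
  have hm2 : l.length - 2 = m := by omega
  unfold pvDiffs pvAllEqual
  rw [hm, List.range_succ_eq_map]
  simp only [List.map_cons, List.map_map, List.all_map, List.all_eq_true, Function.comp]
  constructor
  · intro hall j hj
    have base : ∀ i < m + 1, pvGap l i = pvGap l 0 := by
      intro i hi
      cases i with
      | zero => rfl
      | succ i =>
        have := hall i (by simpa using (by omega : i < m))
        simpa [pvGap] using beq_iff_eq.mp this
    rw [base j (by omega), base (j + 1) (by omega)]
  · intro hcons
    have base : ∀ i ≤ m, pvGap l i = pvGap l 0 := by
      intro i
      induction i with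
      | zero => intro _; rfl
      | succ i ih =>
        intro hi
        rw [← hcons i (by omega)]
        exact ih (by omega)
    intro i
    simp only [List.mem_range]
    intro hi
    exact beq_iff_eq.mpr (by simpa [pvGap] using base (i + 1) (by omega))

theorem cpLoop_eq (l : List Int) :
    cpLoop l =
      if 3 ≤ l.length ∧ 3 ≤ l.length - cpScan l (l.length - 2)
      then some (l.drop (cpScan l (l.length - 2))) else none := by
  induction l with
  | nil => simp [cpLoop]
  | cons x xs ih =>
    by_cases h3 : 3 ≤ (x :: xs).length
    · rw [cpLoop]
      have hlen : (x :: xs).length = xs.length + 1 := rfl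
      rw [if_pos (by omega)]
      by_cases hae : pvAllEqual (pvDiffs (x :: xs)) = true
      · have hk0 : cpScan (x :: xs) ((x :: xs).length - 2) = 0 := by
          rw [cpScan_eq_zero_iff]
          intro j hj
          exact (allEqual_diffs_iff _ h3).mp hae j hj
        rw [if_pos hae, hk0]
        rw [if_pos (by constructor <;> omega)]
        simp
      · have hkpos : 1 ≤ cpScan (x :: xs) ((x :: xs).length - 2) := by
          rcases Nat.eq_zero_or_pos (cpScan (x :: xs) ((x :: xs).length - 2)) with h0 | h
          · exfalso
            exact hae ((allEqual_diffs_iff _ h3).mpr ((cpScan_eq_zero_iff _ _).mp h0))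
          · exact h
        rw [if_neg hae]
        simp only [List.tail_cons]
        rw [ih]
        by_cases h4 : 4 ≤ (x :: xs).length
        · -- xs has length ≥ 3; use the shift lemma
          have hsh : cpScan (x :: xs) ((x :: xs).length - 2) =
              if cpScan xs (xs.length - 2) = 0 then cpScan (x :: xs) 1
              else cpScan xs (xs.length - 2) + 1 := by
            have h1 : 1 ≤ xs.length - 2 := by simp at h4 ⊢; omega
            have := cpScan_cons_shift x xs (xs.length - 2) h1
            rw [← this]
            congr 1
            simp at h4 ⊢
            omega
          by_cases hz : cpScan xs (xs.length - 2) = 0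
          · rw [if_pos hz] at hsh
            have h1le : cpScan (x :: xs) 1 ≤ 1 := cpScan_le _ _
            have hk1 : cpScan (x :: xs) ((x :: xs).length - 2) = 1 := by omega
            rw [hk1]
            rw [hz, if_pos (by constructor <;> simp at h4 ⊢ <;> omega)]
            rw [if_pos (by constructor <;> omega)]
            simp
          · rw [if_neg hz] at hsh
            rw [hsh]
            by_cases hc : 3 ≤ xs.length - cpScan xs (xs.length - 2)
            · rw [if_pos (by constructor <;> simp at h4 ⊢ <;> omega)]
              rw [if_pos (by constructor <;> omega)]
              simp
            · rw [if_neg (by intro h; omega)]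
              rw [if_neg (by intro h; omega)]
        · -- (x :: xs).length = 3: tail too short, and n - k = 2 < 3
          have hk : cpScan (x :: xs) ((x :: xs).length - 2) ≤ 1 := by
            have := cpScan_le (x :: xs) ((x :: xs).length - 2)
            omega
          rw [if_neg (by intro h; simp at h3 h4; omega)]
          rw [if_neg (by intro h; omega)]
    · rw [cpLoop, if_neg (by omega)]
      rw [if_neg (by intro h; omega)]

-- ===== VERDICT (by name: the statement is the Claim_ definition above) =====
theorem check_periodicity_spec : Claim_equal_check_periodicity := by
  intro l _
  unfold Spec_check_periodicity check_periodicity check_periodicity_alt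
  rw [cpLoop_eq]
  by_cases h2 : l.length ≤ 2
  · rw [if_neg (by intro h; omega), if_pos h2]
  · rw [if_neg h2]
    by_cases hc : 3 ≤ l.length - cpScan l (l.length - 2)
    · rw [if_pos ⟨by omega, hc⟩, if_pos hc]
    · rw [if_neg (by intro h; exact hc h.2), if_neg hc]
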